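-- pv_equiv track=rewrite | github.com/pypi-data/pypi-mirror-392 | packages/specql-generator/specql_generator-0.5.0b0-py3-none-any.whl/src/generators/actions/action_orchestrator.py | _extract_job_variables
-- ===== SOURCE A (Python) =====
-- def _extract_job_variables(compiled_steps: list[str]) -> list[str]:
--     """Extract job variable names from compiled steps"""
--     job_vars = []
--     for step in compiled_steps:
--         # Look for RETURNING id INTO _job_id_... pattern
--         if "RETURNING id INTO" in step:
--             lines = step.split("\n")
--             for line in lines:
--                 if "RETURNING id INTO" in line:
--                     # Extract variable name
--                     var_part = line.split("RETURNING id INTO")[1].strip()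
--                     var_name = var_part.split(";")[0].strip()
--                     job_vars.append(var_name)
--                     break
--     return job_vars
-- ===== SOURCE B (Python) =====
-- def _extract_job_variables(compiled_steps):
--     """Extract job variable names from compiled steps"""
--     marker = "RETURNING id INTO"
--     job_vars = []
--     for step in compiled_steps:
--         if marker in step:
--             tail = step.split(marker, 1)[1]
--             job_vars.append(tail.split("\n", 1)[0].split(";", 1)[0].strip())
--     return job_vars
-- ===== Notes on version B (the rewrite author's own statement) =====
-- stated objective: simpler
-- what changed: A splits each step into lines and scans them in an inner loop with break plus an unbounded split()[1]; B drops the inner loop and extracts the name with three one-shot bounded splits (after the first marker, up to the first newline and the first ';'). Pre_ excludes inputs where some line contains the marker more than once, on which A's unbounded split truncating the name at the second marker occurrence is an accident of its implementation.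
-- outside the precondition, e.g. on _extract_job_variables(['c RETURNING id INTO RETURNING id INTO']): A returns [''], B returns ['RETURNING id INTO']
import Mathlib
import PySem

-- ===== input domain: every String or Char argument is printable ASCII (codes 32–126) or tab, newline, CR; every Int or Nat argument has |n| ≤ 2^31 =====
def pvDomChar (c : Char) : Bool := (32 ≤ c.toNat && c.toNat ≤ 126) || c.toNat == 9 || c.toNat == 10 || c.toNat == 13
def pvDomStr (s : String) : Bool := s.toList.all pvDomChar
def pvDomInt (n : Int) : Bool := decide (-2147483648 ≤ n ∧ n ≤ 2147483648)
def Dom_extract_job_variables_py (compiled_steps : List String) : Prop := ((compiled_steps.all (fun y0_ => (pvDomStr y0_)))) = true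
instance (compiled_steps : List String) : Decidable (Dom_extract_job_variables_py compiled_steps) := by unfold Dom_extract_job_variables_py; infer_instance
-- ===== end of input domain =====

-- B replaces A's inner per-line scan (split("\n"), loop with break, unbounded split)
-- by three one-shot bounded splits on the whole step string; same return value (objective: simpler).

-- ===== PORT A =====
-- A's inner `for line in lines: … break` loop: [] if no line matches, else the single appended name
def pvALine (lines : List (List Char)) : List String :=
  match lines with
  | [] => []
  | line :: rest =>
    if PySem.Chars.isIn "RETURNING id INTO".toList line then
      [String.ofList (PySem.Chars.strip
        (PySem.List.pyGetD
          (PySem.Chars.splitOn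
            (PySem.Chars.strip
              (PySem.List.pyGetD (PySem.Chars.splitOn line "RETURNING id INTO".toList) 1 []))
            [';'])
          0 []))]
    else pvALine rest

def extract_job_variables_py (compiled_steps : List String) : List String :=
  compiled_steps.foldl (fun job_vars step =>
    if PySem.Chars.isIn "RETURNING id INTO".toList step.toList then
      job_vars ++ pvALine (PySem.Chars.splitOn step.toList ['\n'])
    else job_vars) []

-- ===== PORT B =====
-- step.split(marker,1)[1].split("\n",1)[0].split(";",1)[0].strip(), read inside-out;
-- the guarded [1]/[0] indexings are PySem.List.pyGetD
def extract_job_variables_py_alt (compiled_steps : List String) : List String :=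
  compiled_steps.foldl (fun job_vars step =>
    if PySem.Chars.isIn "RETURNING id INTO".toList step.toList then
      job_vars ++ [String.ofList (PySem.Chars.strip
        (PySem.List.pyGetD
          (PySem.Chars.splitOnMax
            (PySem.List.pyGetD
              (PySem.Chars.splitOnMax
                (PySem.List.pyGetD
                  (PySem.Chars.splitOnMax step.toList "RETURNING id INTO".toList 1) 1 [])
                ['\n'] 1) 0 [])
            [';'] 1) 0 []))]
    else job_vars) []

-- ===== PRECONDITION & SPEC =====
-- Pre_ excludes inputs where some line of a step contains the marker more than once
-- (i.e. splitting the line on the marker yields more than 2 pieces): there A's unbounded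
-- split truncates the extracted name at the second marker occurrence, an accident of its
-- implementation; B naturally keeps everything up to the first newline/';'.
def Pre_extract_job_variables_py (compiled_steps : List String) : Prop :=
  ∀ step ∈ compiled_steps, ∀ line ∈ PySem.Chars.splitOn step.toList ['\n'],
    (PySem.Chars.splitOn line "RETURNING id INTO".toList).length ≤ 2
instance (compiled_steps : List String) : Decidable (Pre_extract_job_variables_py compiled_steps) := by unfold Pre_extract_job_variables_py; infer_instance
def pvWitness_extract_job_variables_py : List String :=
  ["INSERT INTO jobs VALUES (1)\n  RETURNING id INTO v_job_id;\nCOMMIT"]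

def Spec_extract_job_variables_py (compiled_steps : List String) (out : List String) : Prop := out = extract_job_variables_py_alt compiled_steps
instance (compiled_steps : List String) (out : List String) : Decidable (Spec_extract_job_variables_py compiled_steps out) := by unfold Spec_extract_job_variables_py; infer_instance

-- ===== CLAIM (what is proved, stated in full; the proofs are below) =====
def Claim_equal_extract_job_variables_py : Prop := ∀ (compiled_steps : List String), Dom_extract_job_variables_py compiled_steps → Pre_extract_job_variables_py compiled_steps → Spec_extract_job_variables_py compiled_steps (extract_job_variables_py compiled_steps)

-- ===== LEMMAS AND PROOFS =====

def pvCut (M : List Char) : List Char → List Char × Option (List Char)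
  | [] => ([], none)
  | c :: rest =>
    if M.isPrefixOf (c :: rest) then ([], some (List.drop M.length (c :: rest)))
    else ((c :: (pvCut M rest).1, (pvCut M rest).2))

theorem pvCut_none_fst {M cs : List Char} (h : (pvCut M cs).2 = none) : (pvCut M cs).1 = cs := by
  induction cs with
  | nil => simp [pvCut]
  | cons c rest ih =>
    by_cases hp : M.isPrefixOf (c :: rest) = true
    · simp [pvCut, hp] at h
    · simp [pvCut, hp] at h ⊢; exact ih h

theorem pvCut_some_eq {M cs q : List Char} (h : (pvCut M cs).2 = some q) :
    cs = (pvCut M cs).1 ++ M ++ q := by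
  induction cs with
  | nil => simp [pvCut] at h
  | cons c rest ih =>
    by_cases hp : M.isPrefixOf (c :: rest) = true
    · simp only [pvCut, hp, if_true, Option.some.injEq] at h ⊢
      subst h
      rcases List.isPrefixOf_iff_prefix.mp hp with ⟨t, ht⟩
      rw [← ht, List.drop_left]; simp
    · simp only [pvCut, hp, if_false, Bool.false_eq_true] at h ⊢
      simp only [List.cons_append]
      exact congrArg (c :: ·) (ih h)

theorem pvCut_some_length {M cs q : List Char} (h : (pvCut M cs).2 = some q) :
    M.length + q.length ≤ cs.length := by
  have := pvCut_some_eq h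
  have hlen := congrArg List.length this
  simp [List.length_append] at hlen
  omega

theorem pvCut_single_fst_not_mem (z : Char) (cs : List Char) : z ∉ (pvCut [z] cs).1 := by
  induction cs with
  | nil => simp [pvCut]
  | cons c rest ih =>
    by_cases hp : [z].isPrefixOf (c :: rest) = true
    · simp [pvCut, hp]
    · have hz : z ≠ c := by
        intro hzc; subst hzc; simp [List.isPrefixOf] at hp
      simp [pvCut, hp, hz]; exact ih

theorem pvCut_single_of_not_mem {z : Char} {cs : List Char} (h : z ∉ cs) :
    pvCut [z] cs = (cs, none) := by
  induction cs with
  | nil => simp [pvCut]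
  | cons c rest ih =>
    simp only [List.mem_cons, not_or] at h
    have hp : [z].isPrefixOf (c :: rest) = false := by
      simp [List.isPrefixOf, h.1]
    simp [pvCut, hp, ih h.2]

theorem pvCut_single_append {z : Char} {w y : List Char} (h : z ∉ w) :
    pvCut [z] (w ++ y) = (w ++ (pvCut [z] y).1, (pvCut [z] y).2) := by
  induction w with
  | nil => simp
  | cons c rest ih =>
    simp only [List.mem_cons, not_or] at h
    have hp : [z].isPrefixOf (c :: (rest ++ y)) = false := by
      simp [List.isPrefixOf, h.1]
    simp [pvCut, hp, ih h.2]

theorem pvCut_single_mid {z : Char} {p t : List Char} (h : z ∉ p) :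
    pvCut [z] (p ++ z :: t) = (p, some t) := by
  rw [pvCut_single_append h]
  have : pvCut [z] (z :: t) = ([], some t) := by
    simp [pvCut, List.isPrefixOf]
  simp [this]

theorem pvPrefix_restrict {M u t : List Char} (h : M.isPrefixOf (u ++ t) = true)
    (hl : M.length ≤ u.length) : M.isPrefixOf u = true := by
  rw [List.isPrefixOf_iff_prefix] at h ⊢
  rw [List.prefix_iff_eq_take] at h ⊢
  rw [h, List.take_append_of_le_length hl]
  simp [List.length_take, Nat.min_eq_left hl]

theorem pvCut_append_of_some {M l q : List Char} (h : (pvCut M l).2 = some q) (t : List Char) :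
    pvCut M (l ++ t) = ((pvCut M l).1, some (q ++ t)) := by
  induction l with
  | nil => simp [pvCut] at h
  | cons c rest ih =>
    by_cases hp : M.isPrefixOf (c :: rest) = true
    · simp only [pvCut, hp, if_true, Option.some.injEq] at h
      subst h
      rcases List.isPrefixOf_iff_prefix.mp hp with ⟨u, hu⟩
      have hp2 : M.isPrefixOf (c :: rest ++ t) = true := by
        rw [List.isPrefixOf_iff_prefix]
        exact ⟨u ++ t, by rw [← List.append_assoc, hu]⟩
      simp only [List.cons_append] at hp2 ⊢
      simp only [pvCut, hp2, if_true]
      have hle : M.length ≤ (c :: rest).length := by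
        have := congrArg List.length hu; simp at this; simp; omega
      rw [show c :: (rest ++ t) = (c :: rest) ++ t from rfl,
        List.drop_append_of_le_length hle]
      simp [hp]
    · simp only [pvCut, hp, if_false, Bool.false_eq_true] at h
      have hlen : M.length ≤ rest.length := by
        have := pvCut_some_length h; omega
      have hp2 : M.isPrefixOf (c :: rest ++ t) = false := by
        by_contra hc
        simp only [Bool.not_eq_false] at hc
        have : M.isPrefixOf (c :: rest) = true := by
          apply pvPrefix_restrict (u := c :: rest) (t := t)
          · simpa using hc
          · simp; omega
        simp [this] at hp
      simp only [List.cons_append] at hp2 ⊢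
      simp only [pvCut, hp2, if_false, Bool.false_eq_true, ih h]
      simp [hp]

theorem pvCut_append_of_none {M l t : List Char} {z : Char} (hz : z ∉ M) (hM : M ≠ [])
    (h : (pvCut M l).2 = none) :
    pvCut M (l ++ z :: t) = (l ++ z :: (pvCut M t).1, (pvCut M t).2) := by
  induction l with
  | nil =>
    have hp : M.isPrefixOf (z :: t) = false := by
      by_contra hc
      simp only [Bool.not_eq_false, List.isPrefixOf_iff_prefix] at hc
      rcases hc with ⟨u, hu⟩
      cases M with
      | nil => exact hM rfl
      | cons m ms =>
        simp only [List.cons_append, List.cons.injEq] at hu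
        exact hz (by simp [hu.1])
    simp [pvCut, hp]
  | cons c rest ih =>
    by_cases hp : M.isPrefixOf (c :: rest) = true
    · simp [pvCut, hp] at h
    · simp only [pvCut, hp, if_false, Bool.false_eq_true] at h
      have hp2 : M.isPrefixOf (c :: rest ++ z :: t) = false := by
        by_contra hc
        simp only [Bool.not_eq_false] at hc
        by_cases hlen : M.length ≤ (c :: rest).length
        · have : M.isPrefixOf (c :: rest) = true :=
            pvPrefix_restrict (by simpa using hc) hlen
          simp [this] at hp
        · -- M would contain the char z at index (c :: rest).length
          have hpre : M <+: (c :: rest ++ z :: t) := by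
            rw [← List.isPrefixOf_iff_prefix]; simpa using hc
          have hi : (c :: rest).length < M.length := by omega
          have hi2 : (c :: rest).length < (c :: rest ++ z :: t).length := by
            simp
          have hget := hpre.getElem (i := (c :: rest).length) hi
          have : (c :: rest ++ z :: t)[(c :: rest).length] = z := by
            rw [List.getElem_append_right (le_refl _)]
            simp
          have hzM : M[(c :: rest).length]'hi = z := hget.trans this
          exact hz (hzM ▸ List.getElem_mem hi)
      simp only [List.cons_append] at hp2 ⊢
      simp only [pvCut, hp2, if_false, Bool.false_eq_true, ih h]

theorem pvFind_go_eq_neg_one_iff (M : List Char) (hM : M ≠ []) :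
    ∀ (l : List Char) (k : Nat), (PySem.Chars.find.go M l k = -1 ↔ (pvCut M l).2 = none) := by
  intro l
  induction l with
  | nil =>
    intro k
    have : M.isEmpty = false := by cases M <;> simp_all
    simp [PySem.Chars.find.go, this, pvCut]
  | cons c rest ih =>
    intro k
    by_cases hp : M.isPrefixOf (c :: rest) = true
    · simp [PySem.Chars.find.go, hp, pvCut]
    · simp only [PySem.Chars.find.go, hp, if_false, Bool.false_eq_true, pvCut]
      exact ih (k + 1)

theorem pvIsIn_eq (M cs : List Char) (hM : M ≠ []) :
    PySem.Chars.isIn M cs = (pvCut M cs).2.isSome := by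
  unfold PySem.Chars.isIn PySem.Chars.find
  have := pvFind_go_eq_neg_one_iff M hM cs 0
  cases h : (pvCut M cs).2 with
  | none =>
    rw [h] at this
    simp only [iff_true] at this
    simp [this]
  | some q =>
    rw [h] at this
    simp only [reduceCtorEq, iff_false] at this
    simp [bne_iff_ne, this]

def pvSplit (M cs : List Char) : List (List Char) :=
  if hM : M = [] then [cs]
  else
    match h : (pvCut M cs).2 with
    | none => [(pvCut M cs).1]
    | some q => (pvCut M cs).1 :: pvSplit M q
termination_by cs.length
decreasing_by
  have h1 := pvCut_some_length h
  have h2 : 1 ≤ M.length := by cases M with | nil => exact absurd rfl hM | cons a b => simp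
  omega

theorem pvSplit_of_none {M cs : List Char} (hM : M ≠ []) (h : (pvCut M cs).2 = none) :
    pvSplit M cs = [(pvCut M cs).1] := by
  rw [pvSplit]
  simp only [hM, dite_false]
  split <;> simp_all

theorem pvSplit_of_some {M cs q : List Char} (hM : M ≠ []) (h : (pvCut M cs).2 = some q) :
    pvSplit M cs = (pvCut M cs).1 :: pvSplit M q := by
  rw [pvSplit]
  simp only [hM, dite_false]
  split <;> simp_all

theorem pvSplit_head {M cs : List Char} (hM : M ≠ []) :
    ∃ t, pvSplit M cs = (pvCut M cs).1 :: t := by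
  cases h : (pvCut M cs).2 with
  | none => exact ⟨[], pvSplit_of_none hM h⟩
  | some q => exact ⟨pvSplit M q, pvSplit_of_some hM h⟩

-- a remainder after one cut has no further occurrence when the whole string splits into ≤ 2 pieces
theorem pvCut_none_of_two_pieces {M cs q : List Char} (hM : M ≠ [])
    (h : (pvCut M cs).2 = some q) (hlen : (pvSplit M cs).length ≤ 2) :
    (pvCut M q).2 = none := by
  cases hq : (pvCut M q).2 with
  | none => rfl
  | some r =>
    rw [pvSplit_of_some hM h, pvSplit_of_some hM hq] at hlen
    rcases pvSplit_head (M := M) (cs := r) hM with ⟨t, ht⟩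
    rw [ht] at hlen
    simp at hlen

theorem pvSplit_cons_false {M : List Char} (hM : M ≠ []) {c : Char} {rest : List Char}
    (h : M.isPrefixOf (c :: rest) = false) :
    pvSplit M (c :: rest) = (pvSplit M rest).modifyHead (c :: ·) := by
  have hcut : pvCut M (c :: rest) = (c :: (pvCut M rest).1, (pvCut M rest).2) := by
    simp [pvCut, h]
  cases hr : (pvCut M rest).2 with
  | none =>
    rw [pvSplit_of_none hM (by rw [hcut]; exact hr), pvSplit_of_none hM hr, hcut]
    simp
  | some q =>
    rw [pvSplit_of_some hM (by rw [hcut]; exact hr), pvSplit_of_some hM hr, hcut]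
    simp

theorem pvSplitOn_go (M : List Char) (hM : M ≠ []) :
    ∀ (fuel : Nat) (l cur : List Char) (acc : List (List Char)), l.length ≤ fuel →
      PySem.Chars.splitOn.go M fuel l cur acc
        = acc.reverse ++ (pvSplit M l).modifyHead (cur.reverse ++ ·) := by
  intro fuel
  induction fuel with
  | zero =>
    intro l cur acc hl
    have : l = [] := by cases l <;> simp_all
    subst this
    have : pvSplit M [] = [[]] := pvSplit_of_none hM (by simp [pvCut])
    simp [PySem.Chars.splitOn.go, this]
  | succ fuel ih =>
    intro l cur acc hl
    cases l with
    | nil =>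
      have : pvSplit M [] = [[]] := pvSplit_of_none hM (by simp [pvCut])
      simp [PySem.Chars.splitOn.go, this]
    | cons c rest =>
      by_cases hp : M.isPrefixOf (c :: rest) = true
      · have hM1 : 1 ≤ M.length := by cases M with | nil => exact absurd rfl hM | cons a b => simp
        have hl2 : (List.drop M.length (c :: rest)).length ≤ fuel := by
          simp only [List.length_drop, List.length_cons] at hl ⊢; omega
        rw [PySem.Chars.splitOn.go]
        simp only [hp, if_true]
        rw [ih _ [] _ hl2]
        have hcut : (pvCut M (c :: rest)).2 = some (List.drop M.length (c :: rest)) := by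
          simp [pvCut, hp]
        rw [pvSplit_of_some hM hcut]
        have hfst : (pvCut M (c :: rest)).1 = [] := by simp [pvCut, hp]
        rcases pvSplit_head (M := M) (cs := List.drop M.length (c :: rest)) hM with ⟨t, ht⟩
        simp [hfst, ht]
      · rw [PySem.Chars.splitOn.go]
        rw [if_neg (by simp [hp]), ih rest (c :: cur) acc (by simp at hl; omega)]
        rw [pvSplit_cons_false hM (by revert hp; cases M.isPrefixOf (c :: rest) <;> simp)]
        rcases pvSplit_head (M := M) (cs := rest) hM with ⟨t, ht⟩
        simp [ht]

theorem pvSplitOn_eq (M cs : List Char) (hM : M ≠ []) :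
    PySem.Chars.splitOn cs M = pvSplit M cs := by
  unfold PySem.Chars.splitOn
  rw [pvSplitOn_go M hM (cs.length + 1) cs [] [] (by omega)]
  rcases pvSplit_head (M := M) (cs := cs) hM with ⟨t, ht⟩
  simp [ht]

theorem pvSplitOnMax_go_zero (M : List Char) :
    ∀ (fuel : Nat) (l cur : List Char) (acc : List (List Char)),
      PySem.Chars.splitOnMax.go M fuel 0 l cur acc = ((cur.reverse ++ l) :: acc).reverse := by
  intro fuel l cur acc
  cases fuel with
  | zero => rw [PySem.Chars.splitOnMax.go]
  | succ fuel =>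
    cases l with
    | nil => rw [PySem.Chars.splitOnMax.go] <;> simp
    | cons c rest => rw [PySem.Chars.splitOnMax.go]; simp

theorem pvSplitOnMax_go_one (M : List Char) (hM : M ≠ []) :
    ∀ (fuel : Nat) (l cur : List Char) (acc : List (List Char)), l.length ≤ fuel →
      PySem.Chars.splitOnMax.go M fuel 1 l cur acc
        = match (pvCut M l).2 with
          | none => ((cur.reverse ++ l) :: acc).reverse
          | some q => acc.reverse ++ [cur.reverse ++ (pvCut M l).1, q] := by
  intro fuel
  induction fuel with
  | zero =>
    intro l cur acc hl
    have : l = [] := by cases l <;> simp_all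
    subst this
    rw [PySem.Chars.splitOnMax.go]
    simp [pvCut]
  | succ fuel ih =>
    intro l cur acc hl
    cases l with
    | nil =>
      rw [PySem.Chars.splitOnMax.go] <;> simp [pvCut]
    | cons c rest =>
      by_cases hp : M.isPrefixOf (c :: rest) = true
      · rw [PySem.Chars.splitOnMax.go]
        simp only [hp, if_true, Nat.one_ne_zero, if_false]
        rw [pvSplitOnMax_go_zero]
        simp [pvCut, hp]
      · rw [PySem.Chars.splitOnMax.go]
        have hp' : M.isPrefixOf (c :: rest) = false := by
          revert hp; cases M.isPrefixOf (c :: rest) <;> simp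
        simp only [hp', Nat.one_ne_zero, if_false, Bool.false_eq_true]
        rw [ih rest (c :: cur) acc (by simp at hl ⊢; omega)]
        simp only [pvCut, hp', if_false, Bool.false_eq_true]
        cases hr : (pvCut M rest).2 <;> simp

theorem pvSplitOnMax_one (M cs : List Char) (hM : M ≠ []) :
    PySem.Chars.splitOnMax cs M 1
      = match (pvCut M cs).2 with
        | none => [cs]
        | some q => [(pvCut M cs).1, q] := by
  unfold PySem.Chars.splitOnMax
  rw [if_neg (by norm_num)]
  have h1 : (1 : Int).toNat = 1 := rfl
  rw [h1, pvSplitOnMax_go_one M hM (cs.length + 1) cs [] [] (by omega)]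
  cases hr : (pvCut M cs).2 <;> simp

theorem pvDropWhile_idem (p : Char → Bool) (l : List Char) :
    List.dropWhile p (List.dropWhile p l) = List.dropWhile p l := by
  cases h : List.dropWhile p l with
  | nil => simp
  | cons c rest =>
    have hc : p c = false := by
      have := List.head_dropWhile_not (p := p) (l := l) (by simp [h])
      simpa [h] using this
    simp [hc]

theorem pvRstrip_idem (u : List Char) : PySem.Chars.rstrip (PySem.Chars.rstrip u) = PySem.Chars.rstrip u := by
  unfold PySem.Chars.rstrip
  rw [List.reverse_reverse, pvDropWhile_idem]

theorem pvRstrip_prefix (u : List Char) : PySem.Chars.rstrip u <+: u := by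
  unfold PySem.Chars.rstrip
  have := List.dropWhile_suffix (l := u.reverse) PySem.Chars.isspace
  have h2 := this.reverse
  simpa using h2

theorem pvLstrip_of_head {y : List Char} (h : List.dropWhile PySem.Chars.isspace y = y) :
    PySem.Chars.lstrip (PySem.Chars.rstrip y) = PySem.Chars.rstrip y := by
  cases hr : PySem.Chars.rstrip y with
  | nil => simp [PySem.Chars.lstrip]
  | cons c rest =>
    have hpre : PySem.Chars.rstrip y <+: y := pvRstrip_prefix y
    rw [hr] at hpre
    rcases hpre with ⟨t, ht⟩
    have hc : PySem.Chars.isspace c = false := by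
      rw [← ht] at h
      cases hcc : PySem.Chars.isspace c with
      | false => rfl
      | true =>
        simp only [List.cons_append, List.dropWhile_cons, hcc, if_true] at h
        have hle := List.IsSuffix.length_le
          (List.dropWhile_suffix (l := rest ++ t) PySem.Chars.isspace)
        have hlen := congrArg List.length h
        simp only [List.length_cons, List.length_append] at hle hlen
        omega
    simp [PySem.Chars.lstrip, hc]

theorem pvStrip_space_prefix {w u : List Char} (h : ∀ c ∈ w, PySem.Chars.isspace c = true) :
    PySem.Chars.strip (w ++ u) = PySem.Chars.strip u := by
  unfold PySem.Chars.strip PySem.Chars.lstrip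
  congr 1
  rw [List.dropWhile_append]
  have hw : List.dropWhile PySem.Chars.isspace w = [] := by
    rw [List.dropWhile_eq_nil_iff]
    simpa using h
  simp [hw]

theorem pvRstrip_append_cons {a q : List Char} {c : Char} (h : PySem.Chars.isspace c = false) :
    PySem.Chars.rstrip (a ++ c :: q) = a ++ c :: PySem.Chars.rstrip q := by
  unfold PySem.Chars.rstrip
  have hrw : (a ++ c :: q).reverse = q.reverse ++ c :: a.reverse := by
    simp
  rw [hrw, List.dropWhile_append]
  cases he : (List.dropWhile PySem.Chars.isspace q.reverse).isEmpty with
  | true =>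
    have hnil : List.dropWhile PySem.Chars.isspace q.reverse = [] := by
      simpa [List.isEmpty_iff] using he
    simp [hnil, h]
  | false =>
    simp

theorem pvCut_single_none_not_mem {z : Char} {cs : List Char}
    (h : (pvCut [z] cs).2 = none) : z ∉ cs := by
  induction cs with
  | nil => simp
  | cons c rest ih =>
    by_cases hp : [z].isPrefixOf (c :: rest) = true
    · simp [pvCut, hp] at h
    · have hzc : z ≠ c := fun he => by simp [List.isPrefixOf, he] at hp
      simp only [pvCut, hp, if_false, Bool.false_eq_true] at h
      simp [hzc, ih h]

theorem pvStrip_cut_strip {z : Char} (hz : PySem.Chars.isspace z = false) (x : List Char) :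
    PySem.Chars.strip ((pvCut [z] (PySem.Chars.strip x)).1)
      = PySem.Chars.strip ((pvCut [z] x).1) := by
  -- decompose x = w ++ y with w its leading whitespace
  have hx : x = List.takeWhile PySem.Chars.isspace x ++ List.dropWhile PySem.Chars.isspace x :=
    (List.takeWhile_append_dropWhile).symm
  set w := List.takeWhile PySem.Chars.isspace x with hw
  set y := List.dropWhile PySem.Chars.isspace x with hy
  have hwsp : ∀ c ∈ w, PySem.Chars.isspace c = true := fun c hc => List.mem_takeWhile_imp hc
  have hzw : z ∉ w := fun hc => by rw [hwsp z hc] at hz; simp at hz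
  have hstripx : PySem.Chars.strip x = PySem.Chars.rstrip y := by
    conv_lhs => rw [hx]
    rw [pvStrip_space_prefix hwsp]
    unfold PySem.Chars.strip
    congr 1
    exact pvDropWhile_idem _ _
  have hrhs : (pvCut [z] x).1 = w ++ (pvCut [z] y).1 := by
    conv_lhs => rw [hx]
    rw [pvCut_single_append hzw]
  rw [hrhs, pvStrip_space_prefix hwsp, hstripx]
  cases hc : (pvCut [z] y).2 with
  | none =>
    have hzy : z ∉ y := pvCut_single_none_not_mem hc
    have hzr : z ∉ PySem.Chars.rstrip y := fun hmem => hzy ((pvRstrip_prefix y).subset hmem)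
    rw [pvCut_single_of_not_mem hzr, pvCut_none_fst hc]
    unfold PySem.Chars.strip
    have hyy : PySem.Chars.lstrip y = y := by
      unfold PySem.Chars.lstrip; rw [hy]; exact pvDropWhile_idem _ _
    rw [hyy, pvLstrip_of_head (y := y) (by rw [hy]; exact pvDropWhile_idem _ _), pvRstrip_idem]
  | some q =>
    have heq := pvCut_some_eq hc
    have hza : z ∉ (pvCut [z] y).1 := pvCut_single_fst_not_mem z y
    have hr : PySem.Chars.rstrip y = (pvCut [z] y).1 ++ z :: PySem.Chars.rstrip q := by
      conv_lhs => rw [heq]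
      simpa using pvRstrip_append_cons (a := (pvCut [z] y).1) (q := q) hz
    rw [hr, pvCut_single_mid hza]

theorem pvPyGetD_one {α : Type} (a b : α) (t : List α) (d : α) :
    PySem.List.pyGetD (a :: b :: t) 1 d = b := by
  simp [PySem.List.pyGetD, PySem.List.pyGet?, PySem.List.pyIdx?]

theorem pvPyGetD_zero {α : Type} (a : α) (t : List α) (d : α) :
    PySem.List.pyGetD (a :: t) 0 d = a := by
  simp [PySem.List.pyGetD, PySem.List.pyGet?, PySem.List.pyIdx?]

theorem pvALine_cons_hit {M l lb : List Char} (hM : M ≠ [])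
    (hMeq : M = "RETURNING id INTO".toList) (h : (pvCut M l).2 = some lb)
    (lines : List (List Char)) :
    pvALine (l :: lines)
      = [String.ofList (PySem.Chars.strip
          ((pvCut [';'] (PySem.Chars.strip ((pvCut M lb).1))).1))] := by
  have hin : PySem.Chars.isIn "RETURNING id INTO".toList l = true := by
    rw [← hMeq, pvIsIn_eq M l hM, h]; rfl
  rw [pvALine, if_pos hin, ← hMeq, pvSplitOn_eq M l hM, pvSplit_of_some hM h]
  rcases pvSplit_head (M := M) (cs := lb) hM with ⟨t, ht⟩
  rw [ht, pvPyGetD_one]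
  have hsc : ([';'] : List Char) ≠ [] := by simp
  rw [pvSplitOn_eq [';'] _ hsc]
  rcases pvSplit_head (M := [';']) (cs := PySem.Chars.strip ((pvCut M lb).1)) hsc with ⟨t2, ht2⟩
  rw [ht2, pvPyGetD_zero]

theorem pvALine_cons_miss {M l : List Char} (hM : M ≠ [])
    (hMeq : M = "RETURNING id INTO".toList) (h : (pvCut M l).2 = none)
    (lines : List (List Char)) :
    pvALine (l :: lines) = pvALine lines := by
  have hin : PySem.Chars.isIn "RETURNING id INTO".toList l = false := by
    rw [← hMeq, pvIsIn_eq M l hM, h]; rfl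
  rw [pvALine, if_neg (by rw [hin]; simp)]

-- Under the precondition (no line with two marker occurrences), A's per-line extraction
-- of the first matching line equals the one-shot "after first marker, up to first newline" cut.
theorem pvMain {M : List Char} (hM : M ≠ []) (hnl : '\n' ∉ M)
    (hMeq : M = "RETURNING id INTO".toList) :
    ∀ (n : Nat) (cs b : List Char), cs.length ≤ n → (pvCut M cs).2 = some b →
      (∀ line ∈ pvSplit ['\n'] cs, (pvSplit M line).length ≤ 2) →
      pvALine (pvSplit ['\n'] cs)
        = [String.ofList (PySem.Chars.strip
            ((pvCut [';'] (PySem.Chars.strip ((pvCut ['\n'] b).1))).1))] := by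
  have hnl' : (['\n'] : List Char) ≠ [] := by simp
  intro n
  induction n with
  | zero =>
    intro cs b hlen h hP
    have : cs = [] := by cases cs <;> simp_all
    subst this
    simp [pvCut] at h
  | succ n ih =>
    intro cs b hlen h hP
    cases hline : (pvCut ['\n'] cs).2 with
    | none =>
      -- single line: cs itself
      have hfst : (pvCut ['\n'] cs).1 = cs := pvCut_none_fst hline
      have hmem : cs ∈ pvSplit ['\n'] cs := by
        rw [pvSplit_of_none hnl' hline, hfst]; simp
      have hnmem : '\n' ∉ cs := pvCut_single_none_not_mem hline
      have hnb : '\n' ∉ b := by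
        intro hmem'
        exact hnmem ((pvCut_some_eq h) ▸ (by simp [hmem'] : '\n' ∈ (pvCut M cs).1 ++ M ++ b))
      have hbnone : (pvCut M b).2 = none :=
        pvCut_none_of_two_pieces hM h (hP cs hmem)
      rw [pvSplit_of_none hnl' hline, hfst, pvALine_cons_hit hM hMeq h,
        pvCut_none_fst hbnone,
        (pvCut_single_of_not_mem hnb : pvCut ['\n'] b = (b, none))]
    | some t =>
      -- cs = l ++ '\n' :: t
      set l := (pvCut ['\n'] cs).1 with hl
      have hcs : cs = l ++ ['\n'] ++ t := pvCut_some_eq hline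
      have hnl_l : '\n' ∉ l := hl ▸ pvCut_single_fst_not_mem '\n' cs
      have hsplit : pvSplit ['\n'] cs = l :: pvSplit ['\n'] t := pvSplit_of_some hnl' hline
      rw [hsplit]
      cases hml : (pvCut M l).2 with
      | some lb =>
        -- the hit is on the first line
        have hcs' : cs = l ++ ('\n' :: t) := by simpa using hcs
        have hcut2 : pvCut M cs = ((pvCut M l).1, some (lb ++ '\n' :: t)) := by
          rw [hcs']; exact pvCut_append_of_some hml _
        have hb : b = lb ++ '\n' :: t := by
          rw [hcut2] at h; simpa using h.symm
        have hnl_lb : '\n' ∉ lb := by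
          intro hmem
          exact hnl_l ((pvCut_some_eq hml) ▸ (by simp [hmem] : '\n' ∈ (pvCut M l).1 ++ M ++ lb))
        have hlbnone : (pvCut M lb).2 = none :=
          pvCut_none_of_two_pieces hM hml (hP l (by rw [hsplit]; simp))
        rw [pvALine_cons_hit hM hMeq hml, hb, pvCut_single_mid hnl_lb,
          pvCut_none_fst hlbnone]
      | none =>
        -- skip the first line, recurse on t
        have hcs' : cs = l ++ ('\n' :: t) := by simpa using hcs
        have hcut2 : pvCut M cs = (l ++ '\n' :: (pvCut M t).1, (pvCut M t).2) := by
          rw [hcs']; exact pvCut_append_of_none hnl hM hml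
        have ht : (pvCut M t).2 = some b := by rw [hcut2] at h; exact h
        have hlent : t.length ≤ n := by
          have := congrArg List.length hcs'
          simp only [List.length_append, List.length_cons] at this
          omega
        rw [pvALine_cons_miss hM hMeq hml]
        exact ih t b hlent ht (fun line hline' => hP line (by rw [hsplit]; simp [hline']))

theorem pvStep_eq (job_vars : List String) (step : String)
    (hP : ∀ line ∈ PySem.Chars.splitOn step.toList ['\n'],
      (PySem.Chars.splitOn line "RETURNING id INTO".toList).length ≤ 2) :
    (if PySem.Chars.isIn "RETURNING id INTO".toList step.toList then
      job_vars ++ pvALine (PySem.Chars.splitOn step.toList ['\n'])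
    else job_vars)
    = (if PySem.Chars.isIn "RETURNING id INTO".toList step.toList then
      job_vars ++ [String.ofList (PySem.Chars.strip
        (PySem.List.pyGetD
          (PySem.Chars.splitOnMax
            (PySem.List.pyGetD
              (PySem.Chars.splitOnMax
                (PySem.List.pyGetD
                  (PySem.Chars.splitOnMax step.toList "RETURNING id INTO".toList 1) 1 [])
                ['\n'] 1) 0 [])
            [';'] 1) 0 []))]
    else job_vars) := by
  set M : List Char := "RETURNING id INTO".toList with hMeq
  have hM : M ≠ [] := by rw [hMeq]; decide
  have hnlM : '\n' ∉ M := by rw [hMeq]; decide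
  have hnl' : (['\n'] : List Char) ≠ [] := by simp
  have hsc : ([';'] : List Char) ≠ [] := by simp
  set s : List Char := step.toList with hs
  cases hin : PySem.Chars.isIn M s with
  | false => simp
  | true =>
    have hsome : (pvCut M s).2.isSome := by rw [← pvIsIn_eq M s hM, hin]
    rcases Option.isSome_iff_exists.mp hsome with ⟨b, hb⟩
    have hP' : ∀ line ∈ pvSplit ['\n'] s, (pvSplit M line).length ≤ 2 := by
      intro line hline
      have := hP line (by rwa [pvSplitOn_eq ['\n'] s hnl'] )
      rwa [pvSplitOn_eq M line hM] at this
    -- A side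
    rw [pvSplitOn_eq ['\n'] s hnl', pvMain hM hnlM hMeq s.length s b (le_refl _) hb hP']
    -- B side, innermost out: step.split(marker, 1)[1]
    rw [pvSplitOnMax_one M s hM, hb]
    simp only [pvPyGetD_one]
    -- tail.split("\n", 1)[0]
    have hline : PySem.List.pyGetD (PySem.Chars.splitOnMax b ['\n'] 1) 0 []
        = (pvCut ['\n'] b).1 := by
      rw [pvSplitOnMax_one ['\n'] b hnl']
      cases hc : (pvCut ['\n'] b).2 with
      | none => rw [pvPyGetD_zero, pvCut_none_fst hc]
      | some q => rw [pvPyGetD_zero]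
    rw [hline]
    -- .split(";", 1)[0]
    have hname : PySem.List.pyGetD
        (PySem.Chars.splitOnMax ((pvCut ['\n'] b).1) [';'] 1) 0 []
        = (pvCut [';'] ((pvCut ['\n'] b).1)).1 := by
      rw [pvSplitOnMax_one [';'] _ hsc]
      cases hc : (pvCut [';'] ((pvCut ['\n'] b).1)).2 with
      | none => rw [pvPyGetD_zero, pvCut_none_fst hc]
      | some q => rw [pvPyGetD_zero]
    rw [hname]
    -- A strips the line remainder before the ';' cut, B only at the end; they agree
    rw [pvStrip_cut_strip (by decide) ((pvCut ['\n'] b).1)]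

-- ===== VERDICT (by name: the statement is the Claim_ definition above) =====
theorem extract_job_variables_py_spec : Claim_equal_extract_job_variables_py := by
  intro compiled_steps _ hPre
  unfold Spec_extract_job_variables_py
  unfold extract_job_variables_py extract_job_variables_py_alt
  exact PySem.List.foldl_congr_mem _ _ _ _ (fun job_vars step hmem =>
    pvStep_eq job_vars step (hPre step hmem))
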